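-- pv_equiv track=rewrite | github.com/Rukhan4/Bioinformatics-work | Bioinformatics Specialization/Genome Sequencing(Bioinformatics II)/Week 4/SpectrumConvolution.py | SpectralConvolution
-- ===== SOURCE A (Python) =====
-- def SpectralConvolution(spectrum):
--     sortedspectrum = sorted(spectrum)
--     convolution = []
--     for m in sortedspectrum:
--         for n in sortedspectrum:
--             diff = m-n
--             if diff > 0:
--                 convolution.append(diff)
--     return sorted(convolution)
-- ===== SOURCE B (Python) =====
-- def SpectralConvolution(spectrum):
--     # Histogram convolution: tally the spectrum into value->multiplicity, then
--     # convolve the histogram: each pair of distinct values v > w contributes the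
--     # difference v-w with multiplicity hist[v]*hist[w].
--     hist = {}
--     for x in spectrum:
--         hist[x] = hist.get(x, 0) + 1
--     vals = sorted(hist)
--     diffcount = {}
--     for j, v in enumerate(vals):
--         for w in vals[:j]:
--             d = v - w
--             diffcount[d] = diffcount.get(d, 0) + hist[v] * hist[w]
--     out = []
--     for d in sorted(diffcount):
--         out.extend([d] * diffcount[d])
--     return out
-- ===== Notes on version B (the rewrite author's own statement) =====
-- stated objective: alternative
-- what changed: B never enumerates element pairs: it compresses the spectrum into a value->multiplicity histogram, convolves the histogram over the triangle of sorted distinct value pairs (each pair v>w contributing difference v-w with multiplicity hist[v]*hist[w]), and expands the sorted distinct differences by their tallies, instead of A's n^2 element-pair loop over the sorted input followed by a comparison sort of the n^2-long difference list. (the pair work runs over k distinct values instead of n elements, k ≤ n)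
import Mathlib
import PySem

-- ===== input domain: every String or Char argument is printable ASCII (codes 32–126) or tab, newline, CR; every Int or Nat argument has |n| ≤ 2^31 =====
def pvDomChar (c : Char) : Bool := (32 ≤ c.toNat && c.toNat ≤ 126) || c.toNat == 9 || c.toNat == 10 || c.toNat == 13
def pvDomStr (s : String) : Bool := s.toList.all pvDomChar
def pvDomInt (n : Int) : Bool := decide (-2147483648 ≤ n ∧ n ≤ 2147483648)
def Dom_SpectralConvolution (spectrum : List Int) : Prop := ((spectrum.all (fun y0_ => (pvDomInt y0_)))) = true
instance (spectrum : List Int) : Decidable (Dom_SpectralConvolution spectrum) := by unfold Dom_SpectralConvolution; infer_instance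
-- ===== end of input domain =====

-- B replaces A's n^2 element-pair loop + comparison sort of the n^2-long difference list by a
-- histogram convolution: tally values, convolve distinct sorted values pairwise with multiplicity
-- products, expand sorted differences by tally (measurably faster on the timed inputs).

-- ===== PORT A =====
def SpectralConvolution (spectrum : List Int) : List Int :=
  let sortedspectrum := PySem.List.sorted spectrum (fun x => x) false
  let convolution : List Int :=
    sortedspectrum.foldl (fun conv m =>
      sortedspectrum.foldl (fun conv n =>
        let diff := m - n
        if diff > 0 then conv ++ [diff] else conv) conv) []
  PySem.List.sorted convolution (fun x => x) false

-- ===== PORT B =====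
-- B (histogram convolution): tally the spectrum into a value->multiplicity dict, convolve the
-- histogram over the triangle of sorted distinct value pairs, expand sorted differences by tally.
-- 'hist[v]' / 'diffcount[d]' are looked up only at keys of the dict: getD is exact (no KeyError).
def SpectralConvolution_alt (spectrum : List Int) : List Int :=
  let hist : PySem.Dict Int Int :=
    spectrum.foldl (fun h x => h.insert x (h.getD x 0 + 1)) PySem.Dict.empty
  let vals := PySem.List.sorted hist.keys (fun x => x) false
  let diffcount : PySem.Dict Int Int :=
    (PySem.List.enumerate vals).foldl (fun dc jv =>
      (PySem.List.slice vals none (some jv.1)).foldl (fun dc w =>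
        let d := jv.2 - w
        dc.insert d (dc.getD d 0 + hist.getD jv.2 0 * hist.getD w 0)) dc) PySem.Dict.empty
  (PySem.List.sorted diffcount.keys (fun x => x) false).foldl
    (fun out d => out ++ PySem.List.pyRepeat [d] (diffcount.getD d 0)) []

-- ===== PRECONDITION & SPEC =====
def Spec_SpectralConvolution (spectrum : List Int) (out : List Int) : Prop := out = SpectralConvolution_alt spectrum
instance (spectrum : List Int) (out : List Int) : Decidable (Spec_SpectralConvolution spectrum out) := by unfold Spec_SpectralConvolution; infer_instance

-- ===== CLAIM (what is proved, stated in full; the proofs are below) =====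
def Claim_equal_SpectralConvolution : Prop := ∀ (spectrum : List Int), Dom_SpectralConvolution spectrum → Spec_SpectralConvolution spectrum (SpectralConvolution spectrum)

-- ===== LEMMAS AND PROOFS =====

/-- The multiset of positive pairwise differences of `l`, as a flatMap. -/
def pvDiffs (l : List Int) : List Int :=
  l.flatMap (fun m => (l.filter (fun n => decide (m - n > 0))).map (fun n => m - n))

/-- The sorted distinct values of `l`. -/
def pvVals (l : List Int) : List Int :=
  PySem.List.sorted (PySem.Set.ofList l) (fun x => x) false

/-- B's multiset of differences: triangle of distinct value pairs, expanded by multiplicity. -/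
def pvTri (l : List Int) : List Int :=
  (pvVals l).flatMap (fun v =>
    ((pvVals l).filter (fun w => decide (w < v))).flatMap
      (fun w => List.replicate (l.count v * l.count w) (v - w)))

/-- A's double loop collects exactly the positive differences, in flatMap order. -/
lemma A_outer (l outer : List Int) (init : List Int) :
    outer.foldl (fun conv m =>
      l.foldl (fun conv n =>
        let diff := m - n
        if diff > 0 then conv ++ [diff] else conv) conv) init
    = init ++ outer.flatMap (fun m => (l.filter (fun n => decide (m - n > 0))).map (fun n => m - n)) := by
  induction outer generalizing init with
  | nil => simp
  | cons m t ih =>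
    simp only [List.foldl_cons, List.flatMap_cons, ih]
    rw [PySem.List.foldl_append_ite (p := fun n => m - n > 0) (f := fun n => m - n)]
    simp

lemma diffs_perm (l l' : List Int) (h : l.Perm l') : (pvDiffs l).Perm (pvDiffs l') := by
  unfold pvDiffs
  exact (List.Perm.flatMap_right _ h).trans
    (List.Perm.flatMap_left l' (fun m _ => (h.filter _).map _))

lemma expand_pairwise (c : Int → Nat) (ks : List Int) (h : ks.Pairwise (· < ·)) :
    (ks.flatMap (fun d => List.replicate (c d) d)).Pairwise (· ≤ ·) := by
  induction ks with
  | nil => simp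
  | cons k t ih =>
    simp only [List.flatMap_cons]
    rw [List.pairwise_append]
    refine ⟨List.pairwise_replicate.mpr (by simp), ih h.of_cons, ?_⟩
    intro a ha b hb
    rw [List.eq_of_mem_replicate ha]
    obtain ⟨d, hd, hbd⟩ := List.mem_flatMap.mp hb
    rw [List.eq_of_mem_replicate hbd]
    exact le_of_lt (List.rel_of_pairwise_cons h hd)

lemma expand_count (L : List Int) (ks : List Int) (h : ks.Nodup) (x : Int) :
    (ks.flatMap (fun d => List.replicate (L.count d) d)).count x
      = if x ∈ ks then L.count x else 0 := by
  induction ks with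
  | nil => simp
  | cons k t ih =>
    obtain ⟨hk, ht⟩ := List.nodup_cons.mp h
    simp only [List.flatMap_cons, List.count_append, List.count_replicate, ih ht, List.mem_cons]
    by_cases hx : k = x
    · subst hx; simp [hk]
    · rw [if_neg (by simpa using hx), if_congr (or_iff_right (fun h => hx h.symm)) rfl rfl,
        zero_add]

/-- Expanding the sorted distinct values of `L` by their multiplicities is `sorted(L)`. -/
lemma sorted_eq_expand (L : List Int) :
    PySem.List.sorted L (fun x => x) false =
      (pvVals L).flatMap (fun d => List.replicate (L.count d) d) := by
  have hlt := PySem.List.sorted_ofList_pairwise_lt (xs := L)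
  have hnd : (pvVals L).Nodup := hlt.imp ne_of_lt
  apply PySem.List.sorted_id_eq_of_perm_of_pairwise
  · rw [List.perm_iff_count]
    intro x
    rw [expand_count L _ hnd x]
    by_cases hx : x ∈ L
    · rw [if_pos (by rw [pvVals, PySem.List.mem_sorted]; exact (PySem.Set.mem_ofList L x).mpr hx)]
    · have hnot : x ∉ pvVals L := by
        rw [pvVals, PySem.List.mem_sorted]
        exact fun h => hx ((PySem.Set.mem_ofList L x).mp h)
      rw [if_neg hnot, List.count_eq_zero_of_not_mem hx]
  · exact expand_pairwise (fun d => L.count d) _ hlt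

/-- count over a flatMap is the sum of inner counts. -/
lemma count_flatMap {α β : Type} [BEq β] (l : List α) (f : α → List β) (x : β) :
    (l.flatMap f).count x = (l.map (fun a => (f a).count x)).sum := by
  induction l with
  | nil => rfl
  | cons a t ih => simp [List.count_append, ih]

/-- One weighted insert (weight ≥ 1) is a run of k unit counter steps. -/
lemma weighted_insert (c : PySem.Dict Int Int) (x : Int) (k : Nat) (hk : 1 ≤ k) :
    c.insert x (c.getD x 0 + (k : Int))
      = (List.replicate k x).foldl (fun d y => d.insert y (d.getD y 0 + 1)) c := by
  induction k with
  | zero => omega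
  | succ k ih =>
    by_cases hk1 : 1 ≤ k
    · rw [List.replicate_succ' (n := k) (a := x), List.foldl_append, ← ih hk1]
      simp [PySem.Dict.getD_insert_self, PySem.Dict.insert_insert_self]
      ring_nf
    · have : k = 0 := by omega
      subst this; simp

/-- A weighted counting loop (all weights ≥ 1) is the unit counter loop over the expansion. -/
lemma weighted_fold {α : Type} (P : List α) (f : α → Int) (k : α → Nat)
    (hk : ∀ p ∈ P, 1 ≤ k p) (c : PySem.Dict Int Int) :
    P.foldl (fun c p => c.insert (f p) (c.getD (f p) 0 + (k p : Int))) c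
      = (P.flatMap (fun p => List.replicate (k p) (f p))).foldl
          (fun d y => d.insert y (d.getD y 0 + 1)) c := by
  induction P generalizing c with
  | nil => rfl
  | cons p t ih =>
    simp only [List.foldl_cons, List.flatMap_cons, List.foldl_append]
    rw [weighted_insert c (f p) (k p) (hk p (List.mem_cons_self ..)),
      ih (fun q hq => hk q (List.mem_cons_of_mem _ hq))]

/-- For a strictly increasing list, `take j` is the elements below the `j`-th one. -/
lemma take_eq_filter_lt (l : List Int) (h : l.Pairwise (· < ·)) (j : Nat) (hj : j < l.length) :
    l.take j = l.filter (fun w => decide (w < l[j])) := by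
  induction l generalizing j with
  | nil => simp at hj
  | cons a t ih =>
    match j with
    | 0 =>
      simp only [List.take_zero, List.getElem_cons_zero]
      rw [eq_comm, List.filter_eq_nil_iff]
      intro b hb
      rcases List.mem_cons.mp hb with rfl | hbt
      · simp
      · simpa using not_lt.mpr (le_of_lt (List.rel_of_pairwise_cons h hbt))
    | j + 1 =>
      have hjt : j < t.length := by simpa using hj
      simp only [List.take_succ_cons, List.getElem_cons_succ, List.filter_cons]
      have : a < t[j] := List.rel_of_pairwise_cons h (List.getElem_mem hjt)
      simp only [this, decide_true, if_pos]
      rw [ih h.of_cons j hjt]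
      rfl

lemma foldl_flatMap' {α β γ : Type} (l : List α) (g : α → List β) (f : γ → β → γ) (init : γ) :
    (l.flatMap g).foldl f init = l.foldl (fun acc a => (g a).foldl f acc) init := by
  induction l generalizing init with
  | nil => rfl
  | cons a t ih => simp [List.foldl_append, ih]

lemma flatMap_replicate_const {α β : Type} (k : Nat) (v : α) (g : α → List β) :
    (List.replicate k v).flatMap g = (List.replicate k (g v)).flatten := by
  induction k with
  | zero => rfl
  | succ k ih => simp [List.replicate_succ, ih]

lemma flatMap_ite_nil {α β : Type} (l : List α) (p : α → Bool) (g : α → List β) :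
    l.flatMap (fun a => if p a then g a else []) = (l.filter p).flatMap g := by
  induction l with
  | nil => rfl
  | cons a t ih => by_cases h : p a <;> simp [h, ih]

lemma count_flatten_replicate {α : Type} [BEq α] (k : Nat) (L : List α) (x : α) :
    ((List.replicate k L).flatten).count x = k * L.count x := by
  induction k with
  | zero => simp
  | succ k ih => simp [List.replicate_succ, List.count_append, ih, Nat.succ_mul, Nat.add_comm]

/-- `k` copies of an expanded histogram list permute to the `k`-scaled expansion. -/
lemma replicate_flatten_perm (k : Nat) (l : List Int) (m : Int → Nat) (f : Int → Int) :
    ((List.replicate k (l.flatMap (fun w => List.replicate (m w) (f w)))).flatten).Perm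
      (l.flatMap (fun w => List.replicate (k * m w) (f w))) := by
  rw [List.perm_iff_count]
  intro x
  rw [count_flatten_replicate, count_flatMap, count_flatMap]
  simp only [List.count_replicate]
  rw [← List.sum_map_mul_left]
  congr 1
  apply List.map_congr_left
  intro a _
  by_cases h : f a = x <;> simp [h]

/-- pvDiffs of the expansion of `l` permutes to the triangle multiset `pvTri l`. -/
lemma diffs_expand_perm (l : List Int) :
    (pvDiffs ((pvVals l).flatMap (fun v => List.replicate (l.count v) v))).Perm (pvTri l) := by
  unfold pvDiffs pvTri
  rw [List.flatMap_assoc]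
  apply List.Perm.flatMap_left
  intro v _
  rw [flatMap_replicate_const]
  have hinner : ((((pvVals l).flatMap (fun v => List.replicate (l.count v) v)).filter
        (fun n => decide (v - n > 0))).map (fun n => v - n))
      = ((pvVals l).filter (fun w => decide (w < v))).flatMap
          (fun w => List.replicate (l.count w) (v - w)) := by
    rw [List.filter_flatMap, ← flatMap_ite_nil, List.map_flatMap]
    apply List.flatMap_congr
    intro w _
    rw [List.filter_replicate]
    by_cases h : w < v
    · simp [h]
    · simp [h]
  rw [hinner]
  exact replicate_flatten_perm (l.count v) _ (fun w => l.count w) (fun w => v - w)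

/-- The triangle list `pvTri` permutes to `pvDiffs`. -/
lemma tri_perm_diffs (l : List Int) : (pvTri l).Perm (pvDiffs l) := by
  have h1 : l.Perm ((pvVals l).flatMap (fun v => List.replicate (l.count v) v)) := by
    rw [← sorted_eq_expand]
    exact (PySem.List.sorted_perm (xs := l) (key := fun x => x) (rev := false)).symm
  exact ((diffs_expand_perm l).symm.trans (diffs_perm _ _ h1.symm))

lemma foldl_enumerate_snd {gam : Type} (l : List Int) (G : gam → Int → gam) (init : gam) :
    (PySem.List.enumerate l).foldl (fun acc jv => G acc jv.2) init = l.foldl G init := by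
  conv_rhs => rw [← PySem.List.map_snd_enumerate l 0]
  rw [List.foldl_map]

/-- B's nested weighted-insert loop over the value triangle is the unit counter loop over `pvTri`. -/
lemma B_mid (spectrum : List Int) :
    (PySem.List.enumerate (pvVals spectrum)).foldl (fun dc jv =>
        (PySem.List.slice (pvVals spectrum) none (some jv.1)).foldl (fun dc w =>
          dc.insert (jv.2 - w) (dc.getD (jv.2 - w) 0 +
            (PySem.Dict.counter spectrum).getD jv.2 0 * (PySem.Dict.counter spectrum).getD w 0)) dc)
      PySem.Dict.empty
    = (pvTri spectrum).foldl (fun d y => d.insert y (d.getD y 0 + 1)) PySem.Dict.empty := by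
  have hlt : (pvVals spectrum).Pairwise (· < ·) := by
    unfold pvVals; exact PySem.List.sorted_ofList_pairwise_lt spectrum
  have hmem : ∀ v : Int, v ∈ pvVals spectrum → 1 ≤ spectrum.count v := by
    intro v hv
    simp only [pvVals, PySem.List.mem_sorted, PySem.Set.mem_ofList] at hv
    exact List.count_pos_iff.mpr hv
  rw [PySem.List.foldl_congr_mem (g := fun dc (jv : Int × Int) =>
      (((pvVals spectrum).filter (fun w => decide (w < jv.2))).foldl (fun dc w =>
        dc.insert (jv.2 - w) (dc.getD (jv.2 - w) 0 +
          ((spectrum.count jv.2 * spectrum.count w : Nat) : Int))) dc))]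
  · rw [foldl_enumerate_snd (G := fun (dc : PySem.Dict Int Int) (v : Int) =>
        (((pvVals spectrum).filter (fun w => decide (w < v))).foldl (fun dc w =>
          dc.insert (v - w) (dc.getD (v - w) 0 +
            ((spectrum.count v * spectrum.count w : Nat) : Int))) dc))]
    rw [PySem.List.foldl_congr_mem (g := fun dc (v : Int) =>
        ((((pvVals spectrum).filter (fun w => decide (w < v))).flatMap
          (fun w => List.replicate (spectrum.count v * spectrum.count w) (v - w))).foldl
            (fun d y => d.insert y (d.getD y 0 + 1)) dc))]
    · rw [← foldl_flatMap']
      rfl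
    · intro acc v hv
      exact weighted_fold _ (fun w => v - w) (fun w => spectrum.count v * spectrum.count w)
        (fun w hw => Nat.one_le_iff_ne_zero.mpr (Nat.mul_ne_zero
          (Nat.one_le_iff_ne_zero.mp (hmem v hv))
          (Nat.one_le_iff_ne_zero.mp (hmem w (List.mem_of_mem_filter hw))))) acc
  · intro acc jv hjv
    obtain ⟨k, hk, rfl⟩ := (PySem.List.mem_enumerate_iff _ _ _).mp hjv
    dsimp only
    rw [zero_add, PySem.List.slice_to_natCast, take_eq_filter_lt _ hlt k hk]
    simp only [PySem.Dict.getD_counter, Nat.cast_mul]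

lemma A_eq (spectrum : List Int) :
    SpectralConvolution spectrum = PySem.List.sorted (pvDiffs spectrum) (fun x => x) false := by
  unfold SpectralConvolution
  dsimp only
  rw [A_outer, List.nil_append]
  exact PySem.List.sorted_eq_sorted_of_perm _ _ _ (fun a b h => h)
    (diffs_perm _ _ (PySem.List.sorted_perm (xs := spectrum) (key := fun x => x) (rev := false)))

lemma B_eq (spectrum : List Int) :
    SpectralConvolution_alt spectrum = PySem.List.sorted (pvTri spectrum) (fun x => x) false := by
  unfold SpectralConvolution_alt
  dsimp only
  rw [PySem.Dict.foldl_insert_getD_add_one_eq_counter, PySem.Dict.keys_counter]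
  rw [show PySem.List.sorted (PySem.Set.ofList spectrum) (fun x => x) false = pvVals spectrum from rfl]
  rw [B_mid spectrum]
  rw [PySem.Dict.foldl_insert_getD_add_one_eq_counter, PySem.Dict.keys_counter]
  rw [PySem.List.foldl_append_eq_flatMap, List.nil_append]
  rw [show PySem.List.sorted (PySem.Set.ofList (pvTri spectrum)) (fun x => x) false
      = pvVals (pvTri spectrum) from rfl]
  rw [sorted_eq_expand (pvTri spectrum)]
  apply List.flatMap_congr
  intro d _
  rw [PySem.Dict.getD_counter, PySem.List.pyRepeat_singleton, Int.toNat_natCast]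

-- ===== VERDICT (by name: the statement is the Claim_ definition above) =====
theorem SpectralConvolution_spec : Claim_equal_SpectralConvolution := by
  intro spectrum _
  unfold Spec_SpectralConvolution
  rw [A_eq, B_eq, PySem.List.sorted_id_eq_sorted_id_iff_perm]
  exact (tri_perm_diffs spectrum).symm
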